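-- pv_equiv track=rewrite | github.com/praveenguptaiitr/LeetCodePy | 890.py | word_layout
-- ===== SOURCE A (Python) =====
-- def word_layout(word):
--     d = dict()
--     l = []
--     cnt = 0
--     for i,e in enumerate(word):
--         if e in d:
--             l[d[e]].append(i)
--         else:
--             d[e]=cnt
--             cnt = cnt + 1
--             k = []
--             l.append(k)
--             l[len(l)-1].append(i)
--
--     return l
-- ===== SOURCE B (Python) =====
-- def word_layout(word):
--     return [[i for i, e in enumerate(word) if e == c] for c in dict.fromkeys(word)]
-- ===== Notes on version B (the rewrite author's own statement) =====
-- stated objective: simpler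
-- what changed: Replaces A's one-pass machinery (char->position dict, explicit counter, in-place appends into an index-addressed list of lists) with a nested comprehension: for each first-occurrence-distinct character (dict.fromkeys) collect its indices by filtering enumerate(word).
import Mathlib
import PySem

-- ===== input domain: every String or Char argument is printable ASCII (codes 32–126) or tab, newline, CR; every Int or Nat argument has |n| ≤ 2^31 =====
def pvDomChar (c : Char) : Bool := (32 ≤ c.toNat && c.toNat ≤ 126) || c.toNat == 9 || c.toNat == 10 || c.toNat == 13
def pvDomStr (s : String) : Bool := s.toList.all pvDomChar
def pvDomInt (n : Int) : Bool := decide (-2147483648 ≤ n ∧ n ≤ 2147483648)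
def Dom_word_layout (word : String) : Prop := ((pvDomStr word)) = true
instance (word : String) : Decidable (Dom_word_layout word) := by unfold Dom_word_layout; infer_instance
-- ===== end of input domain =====

-- B replaces A's dict-of-positions + counter + indexed list-of-lists with a single nested
-- comprehension: one index list per first-occurrence-distinct character (objective: simpler).

-- ===== PORT A =====
-- one loop iteration of A: state (d, l, cnt), item (i, e)
def wlStep (st : PySem.Dict Char Int × List (List Int) × Int) (p : Int × Char) :
    PySem.Dict Char Int × List (List Int) × Int :=
  match st with
  | (d, l, cnt) =>
    match d.get? p.2 with
    | some j => (d, PySem.List.pySetD l j (PySem.List.pyGetD l j [] ++ [p.1]), cnt)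
    | none =>
        let d' := d.insert p.2 cnt
        let l' := l ++ [([] : List Int)]
        (d', PySem.List.pySetD l' ((l'.length : Int) - 1)
               (PySem.List.pyGetD l' ((l'.length : Int) - 1) [] ++ [p.1]), cnt + 1)

def word_layout (word : String) : List (List Int) :=
  ((PySem.List.enumerate word.toList 0).foldl wlStep (PySem.Dict.empty, [], 0)).2.1

-- ===== PORT B =====
def word_layout_alt (word : String) : List (List Int) :=
  (PySem.List.dedup word.toList).map (fun c =>
    ((PySem.List.enumerate word.toList 0).filter (fun p => p.2 == c)).map (fun p => p.1))

-- ===== PRECONDITION & SPEC =====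
def Spec_word_layout (word : String) (out : List (List Int)) : Prop := out = word_layout_alt word
instance (word : String) (out : List (List Int)) : Decidable (Spec_word_layout word out) := by unfold Spec_word_layout; infer_instance

-- ===== CLAIM (what is proved, stated in full; the proofs are below) =====
def Claim_equal_word_layout : Prop := ∀ (word : String), Dom_word_layout word → Spec_word_layout word (word_layout word)

-- ===== LEMMAS AND PROOFS =====

-- the index list of character c in xs (B's inner comprehension)
def idxs (c : Char) (xs : List Char) : List Int :=
  ((PySem.List.enumerate xs 0).filter (fun p => p.2 == c)).map (fun p => p.1)

-- the dict A's loop has built after seeing distinct chars ds: each mapped to its position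
def dOf (ds : List Char) (s : Int) : PySem.Dict Char Int :=
  PySem.Dict.mk ((PySem.List.enumerate ds s).map (fun p => (p.2, p.1)))

lemma get?_dOf (ds : List Char) (s : Int) (x : Char) :
    (dOf ds s).get? x = if x ∈ ds then some (s + (ds.idxOf x : Int)) else none := by
  induction ds generalizing s with
  | nil => rfl
  | cons c ds ih =>
      rw [dOf, PySem.List.enumerate_cons]
      by_cases hcx : c = x
      · subst hcx
        simp [PySem.Dict.get?_mk_cons, List.idxOf_cons_self]
      · rw [List.map_cons, PySem.Dict.get?_mk_cons]
        have : (c == x) = false := by simp [hcx]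
        rw [this]
        simp only [Bool.false_eq_true, if_false]
        rw [show PySem.Dict.mk ((PySem.List.enumerate ds (s + 1)).map (fun p => (p.2, p.1)))
              = dOf ds (s + 1) from rfl, ih]
        by_cases hx : x ∈ ds
        · have hxc : x ∈ c :: ds := List.mem_cons_of_mem _ hx
          rw [if_pos hx, if_pos hxc, List.idxOf_cons_ne _ (by exact fun h => hcx h)]
          congr 1
          push_cast
          ring
        · have hxc : x ∉ c :: ds := by
            intro h
            rcases List.mem_cons.1 h with h | h
            · exact hcx h.symm
            · exact hx h
          rw [if_neg hx, if_neg hxc]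

lemma idxs_append (c x : Char) (xs : List Char) :
    idxs c (xs ++ [x]) = idxs c xs ++ (if x == c then [(xs.length : Int)] else []) := by
  unfold idxs
  rw [PySem.List.enumerate_append, List.filter_append, List.map_append]
  congr 1
  simp [PySem.List.enumerate]
  split_ifs <;> simp_all

lemma idxs_nil_of_not_mem (x : Char) (xs : List Char) (hx : x ∉ xs) : idxs x xs = [] := by
  unfold idxs
  rw [List.filter_eq_nil_iff.2, List.map_nil]
  intro p hp
  rcases (PySem.List.mem_enumerate_iff xs 0 p).1 hp with ⟨k, hk, rfl⟩
  intro h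
  exact hx (eq_of_beq h ▸ List.getElem_mem hk)

lemma map_set_idxOf {α : Type} (ds : List Char) (hnd : ds.Nodup) (x : Char) (hx : x ∈ ds)
    (f g : Char → α) (hne : ∀ c ∈ ds, c ≠ x → f c = g c) :
    (ds.map f).set (ds.idxOf x) (g x) = ds.map g := by
  have hlt : ds.idxOf x < ds.length := List.idxOf_lt_length_of_mem hx
  apply List.ext_getElem
  · simp
  · intro k hk1 hk2
    simp only [List.length_set, List.length_map] at hk1
    by_cases hkx : k = ds.idxOf x
    · subst hkx
      rw [List.getElem_set_self]
      have : ds[ds.idxOf x] = x := List.getElem_idxOf hlt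
      simp [this]
    · rw [List.getElem_set_ne (by omega)]
      simp only [List.getElem_map]
      have hne' : ds[k] ≠ x := by
        intro h
        apply hkx
        have h2 : ds[k] = ds[ds.idxOf x] := by rw [h, List.getElem_idxOf hlt]
        exact (List.Nodup.getElem_inj_iff hnd).1 h2
      exact hne ds[k] (List.getElem_mem hk1) hne'

lemma wl_inv (xs : List Char) :
    (PySem.List.enumerate xs 0).foldl wlStep (PySem.Dict.empty, [], 0) =
      (dOf (PySem.List.dedup xs) 0,
       (PySem.List.dedup xs).map (fun c => idxs c xs),
       ((PySem.List.dedup xs).length : Int)) := by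
  induction xs using List.reverseRecOn with
  | nil => rfl
  | append_singleton xs x ih =>
      rw [PySem.List.enumerate_append, List.foldl_append, ih]
      set ds := PySem.List.dedup xs with hds
      have hds_nodup : ds.Nodup := by
        rw [hds, PySem.List.dedup_eq_ofList]; exact PySem.Set.nodup_ofList xs
      have hmem : ∀ c, c ∈ ds ↔ c ∈ xs := fun c => PySem.List.mem_dedup xs c
      simp only [PySem.List.enumerate, List.foldl_cons, List.foldl_nil, zero_add]
      by_cases hx : x ∈ xs
      · -- repeated character: dedup unchanged, append the index to the existing bucket
        have hxds : x ∈ ds := (hmem x).2 hx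
        have hdedup : PySem.List.dedup (xs ++ [x]) = ds := by
          rw [PySem.List.dedup_eq_ofList, PySem.Set.ofList_append_singleton,
              ← PySem.List.dedup_eq_ofList, ← hds, PySem.Set.add_of_mem hxds]
        rw [hdedup, wlStep]
        simp only [get?_dOf, if_pos hxds, zero_add]
        have hlt : ds.idxOf x < ds.length := List.idxOf_lt_length_of_mem hxds
        rw [PySem.List.pySetD_natCast, PySem.List.pyGetD_natCast]
        have hget : (ds.map (fun c => idxs c xs)).getD (ds.idxOf x) [] = idxs x xs := by
          rw [List.getD_eq_getElem?_getD, List.getElem?_map, List.getElem?_eq_getElem hlt]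
          simp [List.getElem_idxOf hlt]
        rw [hget]
        have hgx : idxs x (xs ++ [x]) = idxs x xs ++ [(xs.length : Int)] := by
          rw [idxs_append]; simp
        have hset := map_set_idxOf ds hds_nodup x hxds
          (fun c => idxs c xs) (fun c => idxs c (xs ++ [x]))
          (fun c hc hcx => by
            show idxs c xs = idxs c (xs ++ [x])
            rw [idxs_append]
            have hxc : (x == c) = false := beq_eq_false_iff_ne.2 (Ne.symm hcx)
            rw [hxc]; simp)
        simp only [hgx] at hset
        rw [hset]
      · -- new character: dedup grows by x, a fresh singleton bucket is appended
        have hxds : x ∉ ds := fun h => hx ((hmem x).1 h)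
        have hdedup : PySem.List.dedup (xs ++ [x]) = ds ++ [x] := by
          rw [PySem.List.dedup_eq_ofList, PySem.Set.ofList_append_singleton,
              ← PySem.List.dedup_eq_ofList, ← hds, PySem.Set.add_of_not_mem hxds]
        rw [hdedup, wlStep]
        simp only [get?_dOf, if_neg hxds]
        have hlen : ((((ds.map (fun c => idxs c xs)) ++ [([] : List Int)]).length : Int)) - 1
            = ((ds.length : Nat) : Int) := by
          simp [List.length_append, List.length_map]
        rw [hlen, PySem.List.pySetD_natCast, PySem.List.pyGetD_natCast]
        have hget : ((ds.map (fun c => idxs c xs)) ++ [([] : List Int)]).getD ds.length []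
            = [] := by
          rw [List.getD_eq_getElem?_getD]
          rw [List.getElem?_append_right (by simp)]
          simp
        rw [hget]
        have hsetv : ((ds.map (fun c => idxs c xs)) ++ [([] : List Int)]).set ds.length
              ([] ++ [(xs.length : Int)])
            = (ds.map (fun c => idxs c xs)) ++ [[(xs.length : Int)]] := by
          rw [List.set_append]
          simp
        rw [hsetv]
        refine Prod.ext ?_ (Prod.ext ?_ ?_)
        · -- dict component
          show PySem.Dict.insert (dOf ds 0) x (ds.length : Int) = dOf (ds ++ [x]) 0
          apply PySem.Dict.ext
          have hnc : (dOf ds 0).contains x = false := by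
            rw [← PySem.Dict.get?_eq_none_iff_contains, get?_dOf, if_neg hxds]
          rw [PySem.Dict.items_insert_of_not_contains (h := hnc)]
          show (dOf ds 0).items ++ [(x, (ds.length : Int))]
              = ((PySem.List.enumerate (ds ++ [x]) 0).map (fun p => (p.2, p.1)))
          rw [PySem.List.enumerate_append, List.map_append]
          simp [dOf, PySem.List.enumerate]
        · -- list component
          show (ds.map (fun c => idxs c xs)) ++ [[(xs.length : Int)]]
              = (ds ++ [x]).map (fun c => idxs c (xs ++ [x]))
          rw [List.map_append]
          congr 1
          · apply List.map_congr_left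
            intro c hc
            have hcx : x ≠ c := fun h => hx (h ▸ (hmem c).1 hc)
            rw [idxs_append, beq_eq_false_iff_ne.2 hcx]
            simp
          · rw [List.map_singleton, idxs_append, idxs_nil_of_not_mem x xs hx]
            simp
        · -- counter component
          show ((ds.length : Int) + 1) = (((ds ++ [x]).length : Nat) : Int)
          simp [List.length_append]

-- ===== VERDICT (by name: the statement is the Claim_ definition above) =====
theorem word_layout_spec : Claim_equal_word_layout := by
  intro word _
  unfold Spec_word_layout word_layout word_layout_alt
  rw [wl_inv]
  rfl
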